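-- pv_equiv track=rewrite | github.com/karam-polaris/lms-saba-cleaning | agents/ingest_profiler.py | _combine_headers
-- ===== SOURCE A (Python) =====
-- def _combine_headers(row0: tuple, row1: tuple) -> list[str]:
--     headers, prev_group = [], None
--     for g, d in zip(row0, row1):
--         g = str(g).strip() if g else ""
--         d = str(d).strip() if d else ""
--         if g:
--             prev_group = g
--         group = prev_group or ""
--         if group and d and group.lower() not in d.lower() and d.lower() not in group.lower():
--             headers.append(f"{group}: {d}")
--         elif d:
--             headers.append(d)
--         elif group:
--             headers.append(group)
--         else:
--             headers.append(f"_col_{len(headers)}")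
--     return headers
-- ===== SOURCE B (Python) =====
-- def _clean(x):
--     return str(x).strip() if x else ""
--
--
-- def _name(i, group, d):
--     d = _clean(d)
--     if group and d and group.lower() not in d.lower() and d.lower() not in group.lower():
--         return f"{group}: {d}"
--     if d:
--         return d
--     if group:
--         return group
--     return f"_col_{i}"
--
--
-- def _combine_headers(row0: tuple, row1: tuple) -> list[str]:
--     # segmentation: split the columns into maximal blocks that share one group
--     # label (the block head's cleaned label, or the inherited one), then emit
--     # each block statelessly by column index
--     cols = list(zip(row0, row1))
--     out = []
--     i = 0
--     group = ""
--     while i < len(cols):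
--         g0 = _clean(cols[i][0])
--         if g0:
--             group = g0
--         j = i + 1
--         while j < len(cols) and not _clean(cols[j][0]):
--             j += 1
--         out.extend(_name(k, group, cols[k][1]) for k in range(i, j))
--         i = j
--     return out
-- ===== Notes on version B (the rewrite author's own statement) =====
-- stated objective: alternative
-- what changed: Replaces A's single loop with an Option prev_group threaded through the output list by a segmentation: the columns are split into maximal blocks sharing one group label (an inner scan finds the next non-blank label), and each block is emitted statelessly by column index.
import Mathlib
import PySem

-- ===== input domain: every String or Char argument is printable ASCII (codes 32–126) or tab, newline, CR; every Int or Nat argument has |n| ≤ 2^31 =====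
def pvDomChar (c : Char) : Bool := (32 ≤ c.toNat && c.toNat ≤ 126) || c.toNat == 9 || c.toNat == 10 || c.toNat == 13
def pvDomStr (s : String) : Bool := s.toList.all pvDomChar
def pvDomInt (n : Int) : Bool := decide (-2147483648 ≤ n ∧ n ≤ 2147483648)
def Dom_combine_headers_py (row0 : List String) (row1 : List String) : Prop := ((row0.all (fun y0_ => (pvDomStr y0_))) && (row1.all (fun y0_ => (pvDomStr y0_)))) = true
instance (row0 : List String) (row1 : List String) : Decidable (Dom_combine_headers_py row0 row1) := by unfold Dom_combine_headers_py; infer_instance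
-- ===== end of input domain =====

-- B replaces A's single stateful loop by a segmentation into maximal blocks sharing one group label, each block emitted statelessly; alternative decomposition, same cost.

-- ===== PORT A =====
-- the body of A's for-loop; state = (headers, prev_group)
def pvStepA (st : List String × Option String) (gd : String × String) : List String × Option String :=
  let g := if gd.1 ≠ "" then PySem.Str.strip gd.1 else ""
  let d := if gd.2 ≠ "" then PySem.Str.strip gd.2 else ""
  let prev := if g ≠ "" then some g else st.2
  let group := match prev with | some p => if p ≠ "" then p else "" | none => ""
  let h :=
    if group ≠ "" ∧ d ≠ "" ∧ PySem.Str.isIn (PySem.Str.lower group) (PySem.Str.lower d) = false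
        ∧ PySem.Str.isIn (PySem.Str.lower d) (PySem.Str.lower group) = false then
      group ++ ": " ++ d
    else if d ≠ "" then d
    else if group ≠ "" then group
    else "_col_" ++ PySem.Int.toStr (PySem.List.len st.1)
  (st.1 ++ [h], prev)

def combine_headers_py (row0 : List String) (row1 : List String) : List String :=
  ((row0.zip row1).foldl pvStepA ([], none)).1

-- ===== PORT B =====
-- _clean: the 'str(x).strip() if x else ""' cleaning
def pvClean (s : String) : String := if s ≠ "" then PySem.Str.strip s else ""

-- _name: the stateless header for one column at index i
def pvName (i : Int) (group : String) (d0 : String) : String :=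
  let d := pvClean d0
  if group ≠ "" ∧ d ≠ "" ∧ PySem.Str.isIn (PySem.Str.lower group) (PySem.Str.lower d) = false
      ∧ PySem.Str.isIn (PySem.Str.lower d) (PySem.Str.lower group) = false then
    group ++ ": " ++ d
  else if d ≠ "" then d
  else if group ≠ "" then group
  else "_col_" ++ PySem.Int.toStr i

-- _segments: emit one maximal same-group block (head + following blank-label columns), recurse on the rest
def pvSegments : List (String × String) → String → Int → List String
  | [], _, _ => []
  | c :: rest, group, base =>
      let grp := if pvClean c.1 ≠ "" then pvClean c.1 else group
      let blk := rest.takeWhile (fun c' => pvClean c'.1 == "")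
      ((PySem.List.enumerate (c :: blk) base).map (fun p => pvName p.1 grp p.2.2))
        ++ pvSegments (rest.drop blk.length) grp (base + (1 + blk.length))
termination_by cols _ _ => cols.length
decreasing_by
  simp only [List.length_drop, List.length_cons]
  omega

def combine_headers_py_alt (row0 : List String) (row1 : List String) : List String :=
  pvSegments (row0.zip row1) "" 0

-- ===== PRECONDITION & SPEC =====
def Spec_combine_headers_py (row0 : List String) (row1 : List String) (out : List String) : Prop := out = combine_headers_py_alt row0 row1
instance (row0 : List String) (row1 : List String) (out : List String) : Decidable (Spec_combine_headers_py row0 row1 out) := by unfold Spec_combine_headers_py; infer_instance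

-- ===== CLAIM (what is proved, stated in full; the proofs are below) =====
def Claim_equal_combine_headers_py : Prop := ∀ (row0 : List String) (row1 : List String), Dom_combine_headers_py row0 row1 → Spec_combine_headers_py row0 row1 (combine_headers_py row0 row1)

-- ===== LEMMAS AND PROOFS =====

-- invariant tying A's Option-valued prev_group to B's String-valued group parameter
def pvRel (prev : Option String) (cur : String) : Prop :=
  (prev = none ∧ cur = "") ∨ (prev = some cur ∧ cur ≠ "")

-- one step of A's loop, expressed through B's pvName / pvClean (under the invariant)
lemma pv_step (hs : List String) (prev : Option String) (cur g d : String) (hrel : pvRel prev cur) :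
    pvStepA (hs, prev) (g, d)
      = (hs ++ [pvName (hs.length : Int) (if pvClean g ≠ "" then pvClean g else cur) d],
         if pvClean g ≠ "" then some (pvClean g) else prev) := by
  have hg : (if g ≠ "" then PySem.Str.strip g else "") = pvClean g := rfl
  have hd : (if d ≠ "" then PySem.Str.strip d else "") = pvClean d := rfl
  unfold pvStepA pvName
  simp only [hg, hd]
  by_cases h : pvClean g = ""
  · rcases hrel with ⟨h1, h2⟩ | ⟨h1, h2⟩ <;> simp [h, h1, h2, PySem.List.len]
  · simp [h]

-- one-column unfolding of B's segmentation
lemma pv_seg_cons (c : String × String) (rest : List (String × String)) (group : String) (base : Int) :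
    pvSegments (c :: rest) group base
      = pvName base (if pvClean c.1 ≠ "" then pvClean c.1 else group) c.2
          :: pvSegments rest (if pvClean c.1 ≠ "" then pvClean c.1 else group) (base + 1) := by
  cases rest with
  | nil => simp [pvSegments, PySem.List.enumerate_cons, PySem.List.enumerate_nil]
  | cons b rest' =>
    by_cases hb : pvClean b.1 = ""
    · rw [pvSegments, pvSegments]
      simp only [List.takeWhile_cons, hb, beq_self_eq_true, if_true, ite_not]
      simp [PySem.List.enumerate_cons, List.drop_succ_cons]
      congr 1
      ring
    · rw [pvSegments]
      simp [hb]

-- main invariant: A's loop from any state = emitted prefix ++ B's segmentation of the tail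
lemma pv_main : ∀ (r0 : List String) (r1 hs : List String) (prev : Option String) (cur : String),
    pvRel prev cur →
    ((r0.zip r1).foldl pvStepA (hs, prev)).1
      = hs ++ pvSegments (r0.zip r1) cur (hs.length : Int) := by
  intro r0
  induction r0 with
  | nil => intro r1 hs prev cur _; simp [pvSegments]
  | cons g r0' ih =>
    intro r1 hs prev cur hrel
    cases r1 with
    | nil => simp [pvSegments]
    | cons d r1' =>
      have hrel' : pvRel (if pvClean g ≠ "" then some (pvClean g) else prev)
                         (if pvClean g ≠ "" then pvClean g else cur) := by
        by_cases h : pvClean g = ""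
        · simpa [h] using hrel
        · simp [pvRel, h]
      rw [List.zip_cons_cons, pv_seg_cons, List.foldl_cons,
          pv_step hs prev cur g d hrel,
          ih r1' (hs ++ [pvName (hs.length : Int) (if pvClean g ≠ "" then pvClean g else cur) d]) _ _ hrel']
      simp

-- ===== VERDICT (by name: the statement is the Claim_ definition above) =====
theorem combine_headers_py_spec : Claim_equal_combine_headers_py := by
  intro row0 row1 _
  unfold Spec_combine_headers_py combine_headers_py combine_headers_py_alt
  have := pv_main row0 row1 [] none "" (Or.inl ⟨rfl, rfl⟩)
  simpa using this
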